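-- pv_equiv track=rewrite | github.com/THEAMMO32/Zadacha_s_ciframi | solution.py | find_kth_digit
-- ===== SOURCE A (Python) =====
-- def find_kth_digit(k):
--     """
--     Find the k-th digit in the infinite sequence 123456789101112...
--
--     Args:
--         k (int): Position of the digit (1-indexed)
--
--     Returns:
--         int: The digit at position k
--     """
--     if k <= 0:
--         raise ValueError("k must be a positive integer")
--
--     # Find which group of numbers (by digit count) contains position k
--     digits = 1  # Current number of digits (1-digit, 2-digit, etc.)
--     count = 9  # Count of numbers with 'digits' digits
--     start = 1  # First number with 'digits' digits
--     total_positions = 0  # Total positions covered so far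
--
--     # Determine which digit-length group contains position k
--     while total_positions + digits * count < k:
--         total_positions += digits * count
--         digits += 1
--         count *= 10
--         start *= 10
--
--     # Calculate which number within the group
--     remaining = k - total_positions
--     number_index = (remaining - 1) // digits
--     digit_index = (remaining - 1) % digits
--
--     # Find the actual number and extract the digit
--     number = start + number_index
--     digit = int(str(number)[digit_index])
--
--     return digit
-- ===== SOURCE B (Python) =====
-- def total_digits(n):
--     """Total number of digits in the concatenation of 1, 2, ..., n."""
--     t, p = 0, 1
--     while p <= n:
--         t += (min(n, p * 10 - 1) - p + 1) * len(str(p))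
--         p *= 10
--     return t
--
--
-- def find_kth_digit(k):
--     if k <= 0:
--         raise ValueError("k must be a positive integer")
--     # binary search for the smallest n whose prefix 1..n covers position k
--     lo, hi = 1, k
--     while lo < hi:
--         mid = (lo + hi) // 2
--         if total_digits(mid) < k:
--             lo = mid + 1
--         else:
--             hi = mid
--     s = str(lo)
--     return int(s[len(s) - 1 - (total_digits(lo) - k)])
-- ===== Notes on version B (the rewrite author's own statement) =====
-- stated objective: alternative
-- what changed: B locates the number containing position k by binary search on the prefix function total_digits(n) (total digit count of '12...n') over [1, k] and then indexes str(n) from the end, instead of A's sequential skipping of digit-length groups with count/start/total_positions bookkeeping and a divmod to pick the number inside the group.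
-- outside the precondition, e.g. on find_kth_digit(0): A raises ValueError, B raises ValueError
import Mathlib
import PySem

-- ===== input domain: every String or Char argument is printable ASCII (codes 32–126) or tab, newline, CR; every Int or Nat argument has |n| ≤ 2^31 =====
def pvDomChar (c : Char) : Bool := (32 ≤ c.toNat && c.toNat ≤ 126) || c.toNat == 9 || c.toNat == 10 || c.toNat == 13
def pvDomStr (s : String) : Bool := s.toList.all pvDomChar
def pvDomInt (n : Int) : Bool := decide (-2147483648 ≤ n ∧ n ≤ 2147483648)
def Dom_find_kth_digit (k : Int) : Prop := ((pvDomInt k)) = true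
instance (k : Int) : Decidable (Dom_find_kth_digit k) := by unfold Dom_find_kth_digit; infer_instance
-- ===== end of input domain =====

-- B locates the number containing position k by binary search on the prefix digit-count function
-- total_digits(n) over [1, k], instead of A's sequential group skipping + divmod; same value on every k ≥ 1.

-- int(str(x)[i]) — the digit-extraction expression both Pythons use; none (IndexError/ValueError)
-- never occurs on the inputs reached for k ≥ 1, so .getD 0 is unreachable there
def pyIntAt (x i : Int) : Int :=
  ((PySem.Str.pyGet? (PySem.Int.toStr x) i).bind
    (fun c => PySem.Int.ofChars? [c])).getD 0

-- ===== PORT A =====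
-- A's while-loop over the state (total_positions, digits, count, start); the two Prop arguments only
-- record the invariant 1 ≤ digits, 1 ≤ count needed for termination (the loop's step is digits*count > 0)
def findLoopA (k total digits count start : Int) (hd : 1 ≤ digits) (hc : 1 ≤ count) : Int :=
  if h : total + digits * count < k then
    findLoopA k (total + digits * count) (digits + 1) (count * 10) (start * 10)
      (by omega) (by omega)
  else
    let remaining := k - total
    let number_index := PySem.Int.floordiv (remaining - 1) digits
    let digit_index := PySem.Int.mod (remaining - 1) digits
    let number := start + number_index
    pyIntAt number digit_index
termination_by (k - total).toNat
decreasing_by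
  have h1 : (1 : Int) * 1 ≤ digits * count := mul_le_mul hd hc (by omega) (by omega)
  generalize digits * count = q at h h1 ⊢
  omega

def find_kth_digit (k : Int) : Int :=
  if k ≤ 0 then 0  -- Python raises ValueError here; outside Pre_
  else findLoopA k 0 1 9 1 (by norm_num) (by norm_num)

-- ===== PORT B =====
-- total_digits' while-loop over (t, p); the Prop argument records 1 ≤ p (termination: p *= 10)
def tDLoop (t p n : Int) (hp : 1 ≤ p) : Int :=
  if h : p ≤ n then
    tDLoop (t + (min n (p * 10 - 1) - p + 1) * PySem.Str.len (PySem.Int.toStr p)) (p * 10) n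
      (by omega)
  else t
termination_by (n - p + 1).toNat
decreasing_by
  have _hpn : p ≤ n := h
  omega

-- total number of digits in the concatenation of 1, 2, …, n
def total_digits (n : Int) : Int := tDLoop 0 1 n (le_refl 1)

-- B's binary-search loop: while lo < hi: mid = (lo+hi)//2; if total_digits(mid) < k: lo = mid+1 else hi = mid
def bisect (k lo hi : Int) : Int :=
  if _h : lo < hi then
    if total_digits (PySem.Int.floordiv (lo + hi) 2) < k then
      bisect k (PySem.Int.floordiv (lo + hi) 2 + 1) hi
    else
      bisect k lo (PySem.Int.floordiv (lo + hi) 2)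
  else lo
termination_by (hi - lo).toNat
decreasing_by
  · have := PySem.Int.floordiv_two_mid_bounds (lo := lo) (hi := hi) (by omega)
    omega
  · have h2 : PySem.Int.floordiv (lo + hi) 2 < hi := by
      rw [PySem.Int.floordiv_lt_iff_lt_mul (by norm_num)]
      omega
    have := PySem.Int.floordiv_two_mid_bounds (lo := lo) (hi := hi) (by omega)
    omega

def find_kth_digit_alt (k : Int) : Int :=
  if k ≤ 0 then 0  -- ValueError, outside Pre_
  else
    let lo := bisect k 1 k
    pyIntAt lo (PySem.Str.len (PySem.Int.toStr lo) - 1 - (total_digits lo - k))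

-- ===== PRECONDITION & SPEC =====
-- Pre_: Python A raises ValueError exactly when k ≤ 0
def Pre_find_kth_digit (k : Int) : Prop := 1 ≤ k
instance (k : Int) : Decidable (Pre_find_kth_digit k) := by unfold Pre_find_kth_digit; infer_instance
def pvWitness_find_kth_digit : Int := 1

def Spec_find_kth_digit (k : Int) (out : Int) : Prop := out = find_kth_digit_alt k
instance (k : Int) (out : Int) : Decidable (Spec_find_kth_digit k out) := by unfold Spec_find_kth_digit; infer_instance

-- ===== CLAIM (what is proved, stated in full; the proofs are below) =====
def Claim_equal_find_kth_digit : Prop := ∀ (k : Int), Dom_find_kth_digit k → Pre_find_kth_digit k → Spec_find_kth_digit k (find_kth_digit k)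

-- ===== LEMMAS AND PROOFS =====

-- S d = total number of digits in 1 … 10^d - 1 (closed recursive form of A's total_positions)
def S : Nat → Int
  | 0 => 0
  | d + 1 => S d + 9 * ((d : Int) + 1) * 10 ^ d

-- length of the decimal digit list of an (e+1)-digit number
lemma toDigits_length_eq (e n : Nat) (h1 : 10 ^ e ≤ n) (h2 : n < 10 ^ (e + 1)) :
    (Nat.toDigits 10 n).length = e + 1 := by
  have hle : (Nat.toDigits 10 n).length ≤ e + 1 :=
    (Nat.length_toDigits_le_iff (by norm_num) (by omega)).2 h2
  rcases Nat.eq_zero_or_pos e with rfl | hp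
  · have := Nat.length_toDigits_pos (b := 10) (n := n); omega
  · have h3 : ¬ (Nat.toDigits 10 n).length ≤ e := fun hc =>
      absurd ((Nat.length_toDigits_le_iff (by norm_num) hp).1 hc) (by omega)
    omega

-- len(str(n)) = e+1 for an (e+1)-digit number n
lemma len_toStr_eq (e : Nat) (n : Int) (h1 : (10 : Int) ^ e ≤ n) (h2 : n < 10 ^ (e + 1)) :
    PySem.Str.len (PySem.Int.toStr n) = ((e : Int) + 1) := by
  have hpos : (0 : Int) ≤ n := le_trans (by positivity) h1
  have hc1 : ((10 ^ e : Nat) : Int) ≤ n := by push_cast; exact h1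
  have hn1 : 10 ^ e ≤ n.toNat := by omega
  have hn2 : n.toNat < 10 ^ (e + 1) := by
    have h10 : ((10 ^ (e + 1) : Nat) : Int) = (10 : Int) ^ (e + 1) := by push_cast; ring
    omega
  rw [PySem.Str.len_eq, PySem.Int.toList_toStr]
  have htc : PySem.Int.toChars n = Nat.toDigits 10 n.toNat := by
    simp [PySem.Int.toChars, Int.not_lt.mpr hpos]
  rw [htc, toDigits_length_eq e n.toNat hn1 hn2]
  push_cast; ring

-- len(str(10^j)) = j+1
lemma len_toStr_pow (j : Nat) : PySem.Str.len (PySem.Int.toStr ((10 : Int) ^ j)) = ((j : Int) + 1) :=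
  len_toStr_eq j _ (le_refl _) (by
    have : (10 : Int) ^ j * 1 < 10 ^ j * 10 := by
      have : (0 : Int) < 10 ^ j := by positivity
      omega
    calc (10 : Int) ^ j = 10 ^ j * 1 := by ring
      _ < 10 ^ j * 10 := this
      _ = 10 ^ (j + 1) := by rw [pow_succ])

-- rewriting under tDLoop's Prop argument
lemma tDLoop_congr {t p1 p2 n : Int} (hpq : p1 = p2) (hp : 1 ≤ p1) :
    tDLoop t p1 n hp = tDLoop t p2 n (hpq ▸ hp) := by subst hpq; rfl

-- the tail of the total_digits loop from p = 10^j, for n in the d-digit group (including n = 10^(d-1)-1)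
lemma tDLoop_group : ∀ (m d : Nat), 1 ≤ d → ∀ (j : Nat) (t n : Int),
    j + m = d - 1 → (10 : Int) ^ (d - 1) - 1 ≤ n → n < 10 ^ d →
    tDLoop t ((10 : Int) ^ j) n (one_le_pow₀ (by norm_num))
      = t + (S (d - 1) - S j) + (d : Int) * (n - 10 ^ (d - 1) + 1) := by
  intro m
  induction m with
  | zero =>
    intro d hd j t n hj h1 h2
    have hjd : j = d - 1 := by omega
    subst hjd
    rw [tDLoop]
    by_cases hc : (10 : Int) ^ (d - 1) ≤ n
    · rw [dif_pos hc]
      have hmin : min n ((10 : Int) ^ (d - 1) * 10 - 1) = n := by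
        have hpe : (10 : Int) ^ (d - 1) * 10 = 10 ^ d := by
          rw [← pow_succ]; congr 1; omega
        omega
      rw [tDLoop, dif_neg (by
        have hpe : (10 : Int) ^ (d - 1) * 10 = 10 ^ d := by
          rw [← pow_succ]; congr 1; omega
        omega)]
      rw [hmin, len_toStr_pow]
      have hcast : ((d - 1 : Nat) : Int) + 1 = (d : Int) := by omega
      rw [hcast]
      ring
    · rw [dif_neg hc]
      have hn : n = 10 ^ (d - 1) - 1 := by omega
      subst hn
      ring
  | succ m ih =>
    intro d hd j t n hj h1 h2
    have hjlt : j < d - 1 := by omega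
    have hmono : (10 : Int) ^ (j + 1) ≤ 10 ^ (d - 1) := pow_le_pow_right₀ (by norm_num) (by omega)
    have hjmono : (10 : Int) ^ j < 10 ^ (j + 1) := by
      rw [pow_succ]
      have : (0 : Int) < 10 ^ j := by positivity
      omega
    rw [tDLoop, dif_pos (by omega)]
    have hmin : min n ((10 : Int) ^ j * 10 - 1) = 10 ^ (j + 1) - 1 := by
      rw [← pow_succ]
      omega
    rw [hmin, len_toStr_pow]
    have := tDLoop_congr (t := t + ((10:Int) ^ (j+1) - 1 - 10 ^ j + 1) * ((j:Int) + 1)) (n := n)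
      (show (10 : Int) ^ j * 10 = 10 ^ (j + 1) from by rw [pow_succ])
      (by have h0 : (1 : Int) ≤ 10 ^ j := one_le_pow₀ (by norm_num); omega)
    rw [this, ih d hd (j + 1) _ n (by omega) h1 h2]
    have hS : S (j + 1) = S j + 9 * ((j : Int) + 1) * 10 ^ j := rfl
    have hterm : ((10:Int) ^ (j+1) - 1 - 10 ^ j + 1) * ((j:Int) + 1)
        = 9 * ((j : Int) + 1) * 10 ^ j := by
      rw [pow_succ]; ring
    rw [hterm]
    omega

-- the group formula: total_digits n = S(d-1) + d·(n − 10^(d−1) + 1) on 10^(d−1) − 1 ≤ n < 10^d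
lemma tD_group (d : Nat) (hd : 1 ≤ d) (n : Int)
    (h1 : (10 : Int) ^ (d - 1) - 1 ≤ n) (h2 : n < 10 ^ d) :
    total_digits n = S (d - 1) + (d : Int) * (n - 10 ^ (d - 1) + 1) := by
  unfold total_digits
  rw [tDLoop_congr (show (1 : Int) = 10 ^ 0 from by norm_num) (le_refl 1),
    tDLoop_group (d - 1) d hd 0 0 n (by omega) h1 h2]
  simp [S]

lemma tD_zero : total_digits 0 = 0 := by
  unfold total_digits
  rw [tDLoop, dif_neg (by omega)]

-- every n ≥ 1 lies in exactly one digit-length group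
lemma digit_group (n : Int) (hn : 1 ≤ n) :
    ∃ d : Nat, 1 ≤ d ∧ (10 : Int) ^ (d - 1) ≤ n ∧ n < 10 ^ d := by
  refine ⟨Nat.log 10 n.toNat + 1, by omega, ?_, ?_⟩
  · rw [Nat.add_sub_cancel]
    have h1 := Nat.pow_log_le_self 10 (show n.toNat ≠ 0 by omega)
    have h2 : ((10 ^ Nat.log 10 n.toNat : Nat) : Int) ≤ n :=
      calc ((10 ^ Nat.log 10 n.toNat : Nat) : Int) ≤ (n.toNat : Int) := by exact_mod_cast h1
        _ = n := by omega
    push_cast at h2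
    exact h2
  · have h1 := Nat.lt_pow_succ_log_self (b := 10) (by norm_num) n.toNat
    have h2 : n < ((10 ^ (Nat.log 10 n.toNat + 1) : Nat) : Int) :=
      calc n = (n.toNat : Int) := by omega
        _ < ((10 ^ (Nat.log 10 n.toNat + 1) : Nat) : Int) := by exact_mod_cast h1
    push_cast at h2
    exact h2

-- one monotonicity step
lemma tD_mono_step (n : Int) (hn : 0 ≤ n) : total_digits n ≤ total_digits (n + 1) := by
  obtain ⟨d, hd, h1, h2⟩ := digit_group (n + 1) (by omega)
  rw [tD_group d hd n (by omega) (by omega), tD_group d hd (n + 1) (by omega) h2]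
  have : (0 : Int) ≤ (d : Int) := by omega
  nlinarith

-- total_digits is monotone on n ≥ 0
lemma tD_mono : ∀ (N : Nat) (m n : Int), 0 ≤ m → m ≤ n → (n - m).toNat ≤ N →
    total_digits m ≤ total_digits n := by
  intro N
  induction N with
  | zero => intro m n h0 h1 hN
            have hmn : m = n := by omega
            subst hmn
            exact le_refl _
  | succ N ih =>
    intro m n h0 h1 hN
    by_cases hc : m = n
    · subst hc
      exact le_refl _
    · have := tD_mono_step m h0
      have := ih (m + 1) n (by omega) (by omega) (by omega)
      omega

-- S d ≥ 10^d − 1 (each of the numbers 1 … 10^d−1 contributes at least one digit)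
lemma S_lb : ∀ d : Nat, (10 : Int) ^ d - 1 ≤ S d := by
  intro d
  induction d with
  | zero => simp [S]
  | succ d ih =>
    have h10 : (1 : Int) ≤ 10 ^ d := one_le_pow₀ (by norm_num)
    have hd0 : (0 : Int) ≤ (d : Int) := by omega
    have : (9 : Int) * 10 ^ d ≤ 9 * ((d : Int) + 1) * 10 ^ d := by nlinarith
    simp only [S]
    rw [pow_succ]
    omega

-- total_digits n ≥ n for n ≥ 1
lemma tD_ge (n : Int) (hn : 1 ≤ n) : n ≤ total_digits n := by
  obtain ⟨d, hd, h1, h2⟩ := digit_group n hn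
  rw [tD_group d hd n (by omega) h2]
  have hS := S_lb (d - 1)
  have hd1 : (1 : Int) ≤ (d : Int) := by omega
  have hstep : (0 : Int) ≤ n - 10 ^ (d - 1) + 1 := by omega
  nlinarith

-- the binary search returns an n with total_digits (n−1) < k ≤ total_digits n
lemma bisect_sandwich : ∀ (N : Nat) (k lo hi : Int), 1 ≤ lo → lo ≤ hi →
    total_digits (lo - 1) < k → k ≤ total_digits hi → (hi - lo).toNat ≤ N →
    1 ≤ bisect k lo hi ∧ total_digits (bisect k lo hi - 1) < k ∧ k ≤ total_digits (bisect k lo hi) := by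
  intro N
  induction N with
  | zero =>
    intro k lo hi h1 h2 h3 h4 hN
    have : lo = hi := by omega
    subst this
    rw [bisect, dif_neg (by omega)]
    exact ⟨h1, h3, h4⟩
  | succ N ih =>
    intro k lo hi h1 h2 h3 h4 hN
    rw [bisect]
    by_cases hc : lo < hi
    · rw [dif_pos hc]
      have hmid := PySem.Int.floordiv_two_mid_bounds (lo := lo) (hi := hi) (by omega)
      have hmidlt : PySem.Int.floordiv (lo + hi) 2 < hi := by
        rw [PySem.Int.floordiv_lt_iff_lt_mul (by norm_num)]
        omega
      set mid := PySem.Int.floordiv (lo + hi) 2 with hmiddef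
      by_cases hb : total_digits mid < k
      · rw [if_pos hb]
        exact ih k (mid + 1) hi (by omega) (by omega) (by simpa using hb) h4 (by omega)
      · rw [if_neg hb]
        exact ih k lo mid h1 (by omega) h3 (by omega) (by omega)
    · rw [dif_neg hc]
      have : lo = hi := by omega
      subst this
      exact ⟨h1, h3, h4⟩

-- the sandwich total_digits (n−1) < k ≤ total_digits n determines n
lemma sandwich_unique (k n1 n2 : Int) (h1 : 1 ≤ n1) (h2 : 1 ≤ n2)
    (s1 : total_digits (n1 - 1) < k) (s1' : k ≤ total_digits n1)
    (s2 : total_digits (n2 - 1) < k) (s2' : k ≤ total_digits n2) : n1 = n2 := by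
  by_contra hne
  rcases lt_or_gt_of_ne hne with hlt | hlt
  · have := tD_mono (n2 - 1 - n1).toNat n1 (n2 - 1) (by omega) (by omega) (le_refl _)
    omega
  · have := tD_mono (n1 - 1 - n2).toNat n2 (n1 - 1) (by omega) (by omega) (le_refl _)
    omega

-- findLoopA only depends on the values of its arguments (the Prop arguments are proof-irrelevant)
lemma findLoopA_congr {k t1 t2 d1 d2 c1 c2 s1 s2 : Int} (htq : t1 = t2) (hdq : d1 = d2)
    (hcq : c1 = c2) (hsq : s1 = s2) (p1 : 1 ≤ d1) (p2 : 1 ≤ c1) :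
    findLoopA k t1 d1 c1 s1 p1 p2 = findLoopA k t2 d2 c2 s2 (hdq ▸ p1) (hcq ▸ p2) := by
  subst htq; subst hdq; subst hcq; subst hsq; rfl

-- S's one-step unfolding in terms of d - 1
lemma S_succ (d : Nat) (hd : 1 ≤ d) : S d = S (d - 1) + 9 * (d : Int) * 10 ^ (d - 1) := by
  obtain ⟨m, rfl⟩ : ∃ m, d = m + 1 := ⟨d - 1, by omega⟩
  simp only [S, Nat.add_sub_cancel]
  push_cast
  ring

-- A's loop, started at group d with total = S(d−1) < k, returns B's binary-search answer
lemma loops_eq : ∀ (N : Nat) (d : Nat) (k : Int), 1 ≤ d → S (d - 1) < k →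
    (k - S (d - 1)).toNat ≤ N → ∀ (p1 : (1 : Int) ≤ (d : Int)) (p2 : (1 : Int) ≤ 9 * 10 ^ (d - 1)),
    findLoopA k (S (d - 1)) (d : Int) (9 * 10 ^ (d - 1)) (10 ^ (d - 1)) p1 p2
      = find_kth_digit_alt k := by
  intro N
  induction N with
  | zero =>
    intro d k hd hS hN p1 p2
    omega
  | succ N ihN =>
    intro d k hd hS hN p1 p2
    have hdpos : (0 : Int) < (d : Int) := by exact_mod_cast hd
    have h10 : (1 : Int) ≤ 10 ^ (d - 1) := one_le_pow₀ (by norm_num)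
    have hpow : (10 : Int) ^ d = 10 * 10 ^ (d - 1) := by
      conv_lhs => rw [show d = (d - 1) + 1 from by omega]
      rw [pow_succ]; ring
    have hSd : S d = S (d - 1) + 9 * (d : Int) * 10 ^ (d - 1) := S_succ d hd
    rw [findLoopA]
    by_cases hc : S (d - 1) + (d : Int) * (9 * 10 ^ (d - 1)) < k
    · rw [dif_pos hc]
      have e1 : ((d : Int) + 1) = ((d + 1 : Nat) : Int) := by push_cast; ring
      have e0 : S (d - 1) + (d : Int) * (9 * 10 ^ (d - 1)) = S ((d + 1) - 1) := by
        rw [Nat.add_sub_cancel, hSd]; ring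
      have e2 : (9 * 10 ^ (d - 1) * 10 : Int) = 9 * 10 ^ ((d + 1) - 1) := by
        rw [Nat.add_sub_cancel, mul_assoc, ← pow_succ]
        congr 2
        omega
      have e3 : ((10 : Int) ^ (d - 1) * 10) = 10 ^ ((d + 1) - 1) := by
        rw [Nat.add_sub_cancel, ← pow_succ]
        congr 1
        omega
      have hstep : (1 : Int) ≤ 9 * (d : Int) * 10 ^ (d - 1) := by nlinarith
      have hih := ihN (d + 1) k (by omega)
        (by rw [Nat.add_sub_cancel, hSd]; nlinarith)
        (by rw [Nat.add_sub_cancel, hSd]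
            generalize 9 * (d : Int) * 10 ^ (d - 1) = q at hstep hN ⊢
            omega)
        (by push_cast; omega)
        (by rw [Nat.add_sub_cancel]
            have hp : (1 : Int) ≤ 10 ^ d := one_le_pow₀ (by norm_num)
            linarith)
      exact Eq.trans (findLoopA_congr e0 e1 e2 e3 _ _) hih
    · rw [dif_neg hc]
      show pyIntAt ((10 : Int) ^ (d - 1) + PySem.Int.floordiv (k - S (d - 1) - 1) (d : Int))
          (PySem.Int.mod (k - S (d - 1) - 1) (d : Int)) = find_kth_digit_alt k
      set r := k - S (d - 1) with hrdef
      have hr1 : 1 ≤ r := by omega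
      have hrle : r ≤ 9 * (d : Int) * 10 ^ (d - 1) := by
        have : (d : Int) * (9 * 10 ^ (d - 1)) = 9 * (d : Int) * 10 ^ (d - 1) := by ring
        omega
      set q := PySem.Int.floordiv (r - 1) (d : Int) with hqdef
      set i := PySem.Int.mod (r - 1) (d : Int) with hidef
      have hdm : q * (d : Int) + i = r - 1 := PySem.Int.floordiv_mul_add_mod (r - 1) (d : Int)
      have hi0 : 0 ≤ i := PySem.Int.mod_nonneg _ hdpos
      have hilt : i < (d : Int) := PySem.Int.mod_lt _ hdpos
      have hq0 : 0 ≤ q := by nlinarith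
      have hqlt : q < 9 * 10 ^ (d - 1) := by
        rw [hqdef, PySem.Int.floordiv_lt_iff_lt_mul hdpos]
        nlinarith
      set NA := (10 : Int) ^ (d - 1) + q with hNAdef
      have hNA1 : (10 : Int) ^ (d - 1) ≤ NA := by omega
      have hNA2 : NA < 10 ^ d := by rw [hpow]; omega
      have htDNA : total_digits NA = S (d - 1) + (d : Int) * (q + 1) := by
        rw [tD_group d hd NA (by omega) hNA2]
        congr 1
        rw [hNAdef]
        ring
      have htDNA1 : total_digits (NA - 1) = S (d - 1) + (d : Int) * q := by
        rw [tD_group d hd (NA - 1) (by omega) (by omega)]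
        congr 1
        rw [hNAdef]
        ring
      have hk1 : 1 ≤ k := by
        have := S_lb (d - 1)
        have : (0 : Int) ≤ S (d - 1) := by
          have h1 : (1 : Int) ≤ 10 ^ (d - 1) := one_le_pow₀ (by norm_num)
          omega
        omega
      -- B's binary search lands on NA
      have hbs := bisect_sandwich (k - 1).toNat k 1 k (le_refl 1) hk1
        (by simpa [tD_zero] using hk1) (tD_ge k hk1) (by omega)
      have hbeq : bisect k 1 k = NA := sandwich_unique k (bisect k 1 k) NA hbs.1 (by omega)
        hbs.2.1 hbs.2.2
        (by rw [htDNA1]; nlinarith)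
        (by rw [htDNA]; nlinarith)
      unfold find_kth_digit_alt
      rw [if_neg (by omega)]
      simp only [hbeq]
      have hlen : PySem.Str.len (PySem.Int.toStr NA) = (d : Int) := by
        have hpe : (10 : Int) ^ ((d - 1) + 1) = 10 ^ d := by congr 1; omega
        rw [len_toStr_eq (d - 1) NA hNA1 (by rw [hpe]; exact hNA2)]
        omega
      rw [hlen, htDNA]
      have hexp : (d : Int) * (q + 1) = q * (d : Int) + (d : Int) := by ring
      congr 1
      omega

-- ===== VERDICT (by name: the statement is the Claim_ definition above) =====
theorem find_kth_digit_spec : Claim_equal_find_kth_digit := by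
  intro k _ hpre
  unfold Pre_find_kth_digit at hpre
  unfold Spec_find_kth_digit find_kth_digit
  rw [if_neg (by omega)]
  have h := loops_eq k.toNat 1 k (le_refl 1) (by simpa [S] using hpre)
    (by simp [S]) (by norm_num) (by norm_num)
  simpa [S] using h
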